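-- pv_equiv track=rewrite | github.com/ArduPilot/CustomBuild | scripts/fetch_releases.py | remove_duplicate_entries
-- ===== SOURCE A (Python) =====
-- def remove_duplicate_entries(releases):
--     temp = {}
--     for release in releases:
--         # if we have already seen a version with similar hash
--         # and we now see a beta release with same hash, we skip it
--         if temp.get(release['commit_reference']) and \
--            release['release_type'] == 'beta':
--             continue
--
--         temp[release['commit_reference']] = release
--
--     return list(temp.values())
-- ===== SOURCE B (Python) =====
-- def remove_duplicate_entries(releases):
--     # group releases by commit hash (first-appearance order), then pick one per group
--     groups = {}
--     for release in releases:
--         groups.setdefault(release['commit_reference'], []).append(release)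
--
--     result = []
--     for members in groups.values():
--         rep = members[0]
--         for release in members:
--             if release.get('release_type') != 'beta':
--                 rep = release
--         result.append(rep)
--     return result
-- ===== Notes on version B (the rewrite author's own statement) =====
-- stated objective: alternative
-- what changed: Replaces A's single-pass skip-or-overwrite dict with a two-phase group-then-select: first group releases by commit_reference in first-appearance order, then pick per group the last non-beta release (or the group's first release if all are beta).
import Mathlib
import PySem

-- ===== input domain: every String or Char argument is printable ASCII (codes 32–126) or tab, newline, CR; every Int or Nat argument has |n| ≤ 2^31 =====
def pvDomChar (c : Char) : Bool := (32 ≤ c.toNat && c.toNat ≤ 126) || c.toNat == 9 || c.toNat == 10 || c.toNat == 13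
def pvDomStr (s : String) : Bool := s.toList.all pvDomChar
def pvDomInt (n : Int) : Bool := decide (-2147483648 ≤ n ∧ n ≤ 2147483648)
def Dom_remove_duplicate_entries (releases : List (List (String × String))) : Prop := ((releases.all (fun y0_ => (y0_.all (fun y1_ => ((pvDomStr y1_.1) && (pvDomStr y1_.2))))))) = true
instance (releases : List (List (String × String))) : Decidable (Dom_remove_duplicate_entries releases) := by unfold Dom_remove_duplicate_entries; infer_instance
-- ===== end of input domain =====

-- B replaces A's single-pass skip-or-overwrite dict with a two-phase group-by-hash then
-- pick-representative decomposition (objective: alternative; same O(n) cost).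


-- ===== PORT A =====
-- release['k'] on a dict passed in as an association list: first-match lookup (none = KeyError)
def pvLookup (r : List (String × String)) (k : String) : Option String :=
  (PySem.Dict.mk r).get? k

-- Python truthiness of temp.get(key): None and the empty dict are falsy
def pvTruthy (o : Option (List (String × String))) : Bool :=
  match o with
  | none => false
  | some v => !v.isEmpty

-- one iteration of A's loop: skip a beta whose hash was already seen, else insert/overwrite
def pvStepA (temp : PySem.Dict String (List (String × String)))
    (release : List (String × String)) : PySem.Dict String (List (String × String)) :=
  if pvTruthy (temp.get? ((pvLookup release "commit_reference").getD ""))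
      && (pvLookup release "release_type" == some "beta") then temp
  else temp.insert ((pvLookup release "commit_reference").getD "") release

def remove_duplicate_entries (releases : List (List (String × String))) : List (List (String × String)) :=
  (releases.foldl pvStepA PySem.Dict.empty).values

-- ===== PORT B =====
-- first pass: groups.setdefault(release['commit_reference'], []).append(release)
def pvStepB (groups : PySem.Dict String (List (List (String × String))))
    (release : List (String × String)) : PySem.Dict String (List (List (String × String))) :=
  groups.insert ((pvLookup release "commit_reference").getD "")
    (groups.getD ((pvLookup release "commit_reference").getD "") [] ++ [release])

-- second pass, inner loop: rep = members[0]; every non-beta member replaces rep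
def pvPick (members : List (List (String × String))) : List (String × String) :=
  members.foldl
    (fun rep release => if pvLookup release "release_type" != some "beta" then release else rep)
    (members.headD [])

def remove_duplicate_entries_alt (releases : List (List (String × String))) : List (List (String × String)) :=
  ((releases.foldl pvStepB PySem.Dict.empty).values).map pvPick

-- ===== PRECONDITION & SPEC =====
-- Pre_ is exactly where Python A returns: every release has a 'commit_reference' key, and any
-- release whose commit_reference already occurred earlier also has a 'release_type' key
-- (A raises KeyError otherwise).
def Pre_remove_duplicate_entries (releases : List (List (String × String))) : Prop :=
  (∀ r ∈ releases, pvLookup r "commit_reference" ≠ none) ∧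
  (∀ i : Fin releases.length,
    (∃ r' ∈ releases.take i.val,
        pvLookup r' "commit_reference" = pvLookup releases[i] "commit_reference") →
    pvLookup releases[i] "release_type" ≠ none)

instance (releases : List (List (String × String))) : Decidable (Pre_remove_duplicate_entries releases) := by
  unfold Pre_remove_duplicate_entries; infer_instance

def pvWitness_remove_duplicate_entries : (List (List (String × String))) :=
  [[("commit_reference", "abc"), ("release_type", "stable")],
   [("commit_reference", "abc"), ("release_type", "beta")],
   [("commit_reference", "def")]]

def Spec_remove_duplicate_entries (releases : List (List (String × String))) (out : List (List (String × String))) : Prop := out = remove_duplicate_entries_alt releases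
instance (releases : List (List (String × String))) (out : List (List (String × String))) : Decidable (Spec_remove_duplicate_entries releases out) := by unfold Spec_remove_duplicate_entries; infer_instance

-- ===== CLAIM (what is proved, stated in full; the proofs are below) =====
def Claim_equal_remove_duplicate_entries : Prop := ∀ (releases : List (List (String × String))), Dom_remove_duplicate_entries releases → Pre_remove_duplicate_entries releases → Spec_remove_duplicate_entries releases (remove_duplicate_entries releases)


-- ===== LEMMAS AND PROOFS =====

-- the representative B picks is one of the group's members
lemma pvFoldPick_eq_or_mem (l : List (List (String × String))) (a : List (String × String)) :
    l.foldl (fun rep release => if pvLookup release "release_type" != some "beta" then release else rep) a = a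
    ∨ l.foldl (fun rep release => if pvLookup release "release_type" != some "beta" then release else rep) a ∈ l := by
  induction l generalizing a with
  | nil => exact Or.inl rfl
  | cons x xs ih =>
    simp only [List.foldl_cons]
    rcases ih (if pvLookup x "release_type" != some "beta" then x else a) with h1 | h1
    · rw [h1]
      by_cases hc : pvLookup x "release_type" != some "beta"
      · simp [hc]
      · simp [hc]
    · exact Or.inr (List.mem_cons_of_mem _ h1)

lemma pvPick_mem (l : List (List (String × String))) (h : l ≠ []) : pvPick l ∈ l := by
  unfold pvPick
  rcases pvFoldPick_eq_or_mem l (l.headD []) with h1 | h1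
  · rw [h1]
    cases l with
    | nil => exact absurd rfl h
    | cons x xs => simp
  · exact h1

lemma pvPick_singleton (r : List (String × String)) : pvPick [r] = r := by
  unfold pvPick
  simp

lemma pvPick_append (l : List (List (String × String))) (r : List (String × String)) (h : l ≠ []) :
    pvPick (l ++ [r]) = if pvLookup r "release_type" != some "beta" then r else pvPick l := by
  unfold pvPick
  rw [List.foldl_append]
  have hhead : (l ++ [r]).headD ([] : List (String × String)) = l.headD [] := by
    cases l with
    | nil => exact absurd rfl h
    | cons x xs => rfl
  rw [hhead]
  simp

-- one loop iteration preserves the A-state = mapped-B-state correspondence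
lemma pvStep_inv (temp : PySem.Dict String (List (String × String)))
    (g : PySem.Dict String (List (List (String × String))))
    (r : List (String × String))
    (hr : pvLookup r "commit_reference" ≠ none)
    (hitems : temp.items = g.items.map (fun p => (p.1, pvPick p.2)))
    (hne : ∀ p ∈ g.items, p.2 ≠ [] ∧ ∀ x ∈ p.2, x ≠ [])
    (hnodup : g.keys.Nodup) :
    (pvStepA temp r).items = (pvStepB g r).items.map (fun p => (p.1, pvPick p.2))
    ∧ (∀ p ∈ (pvStepB g r).items, p.2 ≠ [] ∧ ∀ x ∈ p.2, x ≠ [])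
    ∧ (pvStepB g r).keys.Nodup := by
  set k := (pvLookup r "commit_reference").getD "" with hk
  have hrne : r ≠ [] := by
    intro h0
    apply hr
    subst h0
    simp [pvLookup, PySem.Dict.get?]
  -- A's and B's dicts contain the same keys
  have hcont : temp.contains k = g.contains k := by
    simp only [PySem.Dict.contains, hitems, List.any_map]
    rfl
  -- A's stored value at k is pvPick of B's group at k
  have hget : temp.get? k = (g.get? k).map pvPick := by
    simp only [PySem.Dict.get?, hitems, List.find?_map]
    rw [show ((fun p : String × List (String × String) => (p.1 == k)) ∘
        (fun p : String × List (List (String × String)) => (p.1, pvPick p.2)))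
        = (fun p : String × List (List (String × String)) => (p.1 == k)) from rfl]
    cases g.items.find? (fun p => p.1 == k) <;> rfl
  by_cases hc : g.contains k = true
  · -- the hash was seen before: B's group at k is some nonempty l
    obtain ⟨l, hl⟩ : ∃ l, g.get? k = some l := by
      rw [PySem.Dict.contains_eq_isSome_get?] at hc
      exact Option.isSome_iff_exists.mp hc
    have hlmem : (k, l) ∈ g.items := by
      simp only [PySem.Dict.get?] at hl
      obtain ⟨p, hp, hp2⟩ := Option.map_eq_some_iff.mp hl
      have hmem := List.mem_of_find?_eq_some hp
      have hfst := List.find?_some hp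
      have hpfst : p.1 = k := by simpa using hfst
      have hpeq : p = (k, l) := by
        cases p; simp_all
      rwa [hpeq] at hmem
    obtain ⟨hlne, hlel⟩ := hne _ hlmem
    simp only at hlne hlel
    have htruthy : pvTruthy (temp.get? k) = true := by
      rw [hget, hl]
      have hm := pvPick_mem l hlne
      have hpne : pvPick l ≠ [] := hlel _ hm
      simp [pvTruthy, hpne]
    have hgetD : g.getD k [] = l := by
      simp [PySem.Dict.getD, hl]
    have hBitems : (pvStepB g r).items
        = g.items.map (fun p => if p.1 == k then (k, l ++ [r]) else p) := by
      unfold pvStepB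
      rw [← hk, hgetD, PySem.Dict.items_insert_of_contains g (l ++ [r]) hc]
    have hne' : ∀ p ∈ (pvStepB g r).items, p.2 ≠ [] ∧ ∀ x ∈ p.2, x ≠ [] := by
      intro p hp
      unfold pvStepB at hp
      rw [← hk, hgetD] at hp
      rcases (PySem.Dict.mem_items_insert g k (l ++ [r]) p).mp hp with h1 | h1
      · subst h1
        refine ⟨by simp, ?_⟩
        intro x hx
        rcases List.mem_append.mp hx with h2 | h2
        · exact hlel x h2
        · simp at h2; subst h2; exact hrne
      · exact hne p h1.1
    have hnodup' : (pvStepB g r).keys.Nodup := by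
      unfold pvStepB
      exact PySem.Dict.nodup_keys_insert _ _ _ hnodup
    by_cases hb : pvLookup r "release_type" = some "beta"
    · -- beta duplicate: A skips, B's pick ignores the appended beta
      have hA : pvStepA temp r = temp := by
        unfold pvStepA
        rw [← hk, htruthy]
        simp [hb]
      refine ⟨?_, hne', hnodup'⟩
      rw [hA, hitems, hBitems, List.map_map]
      apply List.map_congr_left
      intro p hp
      by_cases hpk : p.1 = k
      · have hp2 : p.2 = l := by
          have hmem' : (p.1, p.2) ∈ g.items := by simpa using hp
          have hg := PySem.Dict.get?_of_mem_items g hmem' hnodup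
          rw [hpk, hl] at hg
          exact (Option.some_inj.mp hg).symm
        have hpick : pvPick (l ++ [r]) = pvPick l := by
          rw [pvPick_append l r hlne]
          simp [hb]
        simp [Function.comp, hpk, hpick, hp2]
      · simp [Function.comp, hpk]
    · -- non-beta duplicate: A overwrites, B's pick selects the appended release
      have hA : (pvStepA temp r).items
          = temp.items.map (fun p => if p.1 == k then (k, r) else p) := by
        unfold pvStepA
        rw [← hk, htruthy]
        simp only [Bool.true_and, beq_iff_eq, hb, if_false,
          PySem.Dict.items_insert_of_contains temp r (hcont.trans hc)]
      refine ⟨?_, hne', hnodup'⟩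
      rw [hA, hitems, hBitems, List.map_map, List.map_map]
      apply List.map_congr_left
      intro p hp
      by_cases hpk : p.1 = k
      · have hpick : pvPick (l ++ [r]) = r := by
          rw [pvPick_append l r hlne]
          simp [hb]
        simp [Function.comp, hpk, hpick]
      · simp [Function.comp, hpk]
  · -- new hash: both append a fresh entry
    have hc' : g.contains k = false := by simpa using hc
    have htruthy : pvTruthy (temp.get? k) = false := by
      rw [hget]
      have hnone : g.get? k = none := by
        rw [PySem.Dict.contains_eq_isSome_get?] at hc'
        simpa using hc'
      rw [hnone]
      rfl
    have hA : (pvStepA temp r).items = temp.items ++ [(k, r)] := by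
      unfold pvStepA
      rw [← hk, htruthy]
      simp only [Bool.false_and, Bool.false_eq_true, if_false]
      exact PySem.Dict.items_insert_of_not_contains temp r (hcont.trans hc')
    have hgetD : g.getD k [] = [] := PySem.Dict.getD_of_not_contains g [] hc'
    have hBitems : (pvStepB g r).items = g.items ++ [(k, [r])] := by
      unfold pvStepB
      rw [← hk, hgetD]
      simpa using PySem.Dict.items_insert_of_not_contains g [r] hc'
    refine ⟨?_, ?_, ?_⟩
    · rw [hA, hitems, hBitems, List.map_append]
      simp [pvPick_singleton]
    · intro p hp
      rw [hBitems] at hp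
      rcases List.mem_append.mp hp with h1 | h1
      · exact hne p h1
      · simp at h1
        subst h1
        exact ⟨by simp, by intro x hx; simp at hx; subst hx; exact hrne⟩
    · unfold pvStepB
      exact PySem.Dict.nodup_keys_insert _ _ _ hnodup

-- loop invariant: A's dict is B's groups dict with each group replaced by its representative
lemma pvInv (rs : List (List (String × String)))
    (temp : PySem.Dict String (List (String × String)))
    (g : PySem.Dict String (List (List (String × String))))
    (hgood : ∀ r ∈ rs, pvLookup r "commit_reference" ≠ none)
    (hitems : temp.items = g.items.map (fun p => (p.1, pvPick p.2)))
    (hne : ∀ p ∈ g.items, p.2 ≠ [] ∧ ∀ x ∈ p.2, x ≠ [])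
    (hnodup : g.keys.Nodup) :
    (rs.foldl pvStepA temp).items
      = (rs.foldl pvStepB g).items.map (fun p => (p.1, pvPick p.2)) := by
  induction rs generalizing temp g with
  | nil => exact hitems
  | cons r rs ih =>
    simp only [List.foldl_cons]
    obtain ⟨h1, h2, h3⟩ := pvStep_inv temp g r (hgood r (List.mem_cons_self)) hitems hne hnodup
    exact ih (pvStepA temp r) (pvStepB g r) (fun x hx => hgood x (List.mem_cons_of_mem _ hx)) h1 h2 h3

-- ===== VERDICT (by name: the statement is the Claim_ definition above) =====
theorem remove_duplicate_entries_spec : Claim_equal_remove_duplicate_entries := by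
  intro releases _ hpre
  unfold Spec_remove_duplicate_entries remove_duplicate_entries remove_duplicate_entries_alt
  have h := pvInv releases PySem.Dict.empty PySem.Dict.empty hpre.1
    (by simp [PySem.Dict.empty]) (by simp [PySem.Dict.empty]) PySem.Dict.nodup_keys_empty
  simp only [PySem.Dict.values, h, List.map_map]
  rfl
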